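-- pv_equiv track=rewrite | github.com/bannedbook/fanqiang | ChromeGo/XX-Net/code/default/python27/1.0/lib/noarch/hyper/packages/rfc3986/normalizers.py | remove_dot_segments
-- ===== SOURCE A (Python) =====
-- def remove_dot_segments(s):
--     # See http://tools.ietf.org/html/rfc3986#section-5.2.4 for pseudo-code
--     segments = s.split('/')  # Turn the path into a list of segments
--     output = []  # Initialize the variable to use to store output
--
--     for segment in segments:
--         # '.' is the current directory, so ignore it, it is superfluous
--         if segment == '.':
--             continue
--         # Anything other than '..', should be appended to the output
--         elif segment != '..':
--             output.append(segment)
--         # In this case segment == '..', if we can, we should pop the last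
--         # element
--         elif output:
--             output.pop()
--
--     # If the path starts with '/' and the output is empty or the first string
--     # is non-empty
--     if s.startswith('/') and (not output or output[0]):
--         output.insert(0, '')
--
--     # If the path starts with '/.' or '/..' ensure we add one more empty
--     # string to add a trailing '/'
--     if s.endswith(('/.', '/..')):
--         output.append('')
--
--     return '/'.join(output)
-- ===== SOURCE B (Python) =====
-- def remove_dot_segments(s):
--     # Recursive right-to-left resolution: a '..' becomes a pending-skip count
--     # that cancels ordinary segments to its left; no mutable stack is used.
--     def resolve(segs):
--         if not segs:
--             return (0, [])
--         skip, kept = resolve(segs[1:])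
--         seg = segs[0]
--         if seg == '.':
--             return (skip, kept)
--         if seg == '..':
--             return (skip + 1, kept)
--         if skip:
--             return (skip - 1, kept)
--         return (skip, [seg] + kept)
--
--     _, out = resolve(s.split('/'))
--
--     if s.startswith('/') and (not out or out[0]):
--         out = [''] + out
--
--     if s.endswith(('/.', '/..')):
--         out = out + ['']
--
--     return '/'.join(out)
-- ===== Notes on version B (the rewrite author's own statement) =====
-- stated objective: alternative
-- what changed: Replaced the imperative left-to-right stack loop (append/pop on a growing output list) by a recursive right-to-left resolution that returns a (pending-skip count, kept segments) pair, where each parent-directory segment is recorded as a skip that cancels ordinary segments to its left; the two trailing post-processing steps are kept.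
import Mathlib
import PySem

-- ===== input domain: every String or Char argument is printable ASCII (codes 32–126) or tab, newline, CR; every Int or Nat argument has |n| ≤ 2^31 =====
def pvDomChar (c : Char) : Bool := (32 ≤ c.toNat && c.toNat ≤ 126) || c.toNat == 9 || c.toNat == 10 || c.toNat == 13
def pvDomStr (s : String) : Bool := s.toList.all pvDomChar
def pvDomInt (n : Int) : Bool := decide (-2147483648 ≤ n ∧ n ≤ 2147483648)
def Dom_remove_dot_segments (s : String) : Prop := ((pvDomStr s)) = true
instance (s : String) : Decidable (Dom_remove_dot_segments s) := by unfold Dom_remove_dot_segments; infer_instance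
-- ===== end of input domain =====

-- B replaces A's imperative left-to-right stack loop by a recursive right-to-left
-- resolution returning a (pending-skip, kept segments) pair (objective: alternative).

-- ===== PORT A =====
-- s.split('/') with the non-empty literal separator "/": split? is always `some` there
def remove_dot_segments (s : String) : String :=
  let segments := (PySem.Str.split? s "/").getD []
  let output := segments.foldl
    (fun output segment =>
      if segment = "." then output
      else if segment ≠ ".." then output ++ [segment]
      else if output ≠ [] then output.dropLast
      else output) []
  let output := if PySem.Str.startswith s "/" && (output.isEmpty || output.headD "" ≠ "")
    then "" :: output else output
  let output := if PySem.Str.endswith s "/." || PySem.Str.endswith s "/.."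
    then output ++ [""] else output
  PySem.Str.join "/" output

-- ===== PORT B =====
-- recursive helper `resolve` of Source B: returns (pending '..' skips, surviving segments)
def pvResolve : List String → Nat × List String
  | [] => (0, [])
  | seg :: rest =>
    let st := pvResolve rest
    if seg = "." then st
    else if seg = ".." then (st.1 + 1, st.2)
    else if st.1 ≠ 0 then (st.1 - 1, st.2)
    else (st.1, seg :: st.2)

def remove_dot_segments_alt (s : String) : String :=
  let out := (pvResolve ((PySem.Str.split? s "/").getD [])).2
  let out := if PySem.Str.startswith s "/" && (out.isEmpty || out.headD "" ≠ "")
    then "" :: out else out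
  let out := if PySem.Str.endswith s "/." || PySem.Str.endswith s "/.."
    then out ++ [""] else out
  PySem.Str.join "/" out

-- ===== PRECONDITION & SPEC =====
def Spec_remove_dot_segments (s : String) (out : String) : Prop := out = remove_dot_segments_alt s
instance (s : String) (out : String) : Decidable (Spec_remove_dot_segments s out) := by unfold Spec_remove_dot_segments; infer_instance

-- ===== CLAIM (what is proved, stated in full; the proofs are below) =====
def Claim_equal_remove_dot_segments : Prop := ∀ (s : String), Dom_remove_dot_segments s → Spec_remove_dot_segments s (remove_dot_segments s)

-- ===== LEMMAS AND PROOFS =====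

-- pop the last element k times (dropLast clamps at [], exactly as A's guarded pop does)
def pvPopN : Nat → List String → List String
  | 0, l => l
  | k + 1, l => pvPopN k l.dropLast

theorem pvPopN_nil (k : Nat) : pvPopN k [] = [] := by
  induction k with
  | zero => rfl
  | succ k ih => simpa [pvPopN] using ih

theorem pvPopN_concat (k : Nat) (acc : List String) (x : String) :
    pvPopN (k + 1) (acc ++ [x]) = pvPopN k acc := by
  simp [pvPopN]

-- the core invariant: A's stack fold from any accumulator equals B's (skip, kept) summary
theorem pvGen (segs : List String) : ∀ acc : List String,
    segs.foldl
      (fun output segment =>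
        if segment = "." then output
        else if segment ≠ ".." then output ++ [segment]
        else if output ≠ [] then output.dropLast
        else output) acc
    = pvPopN (pvResolve segs).1 acc ++ (pvResolve segs).2 := by
  induction segs with
  | nil => intro acc; simp [pvResolve, pvPopN]
  | cons seg rest ih =>
    intro acc
    simp only [List.foldl_cons, ih, pvResolve]
    obtain ⟨k, kept⟩ : Nat × List String := pvResolve rest
    by_cases h1 : seg = "."
    · simp [h1]
    · by_cases h2 : seg = ".."
      · have hdrop : (if acc ≠ [] then acc.dropLast else acc) = acc.dropLast := by
          cases acc <;> simp
        simp [h2, hdrop, pvPopN]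
      · cases k with
        | zero => simp [h1, h2, pvPopN]
        | succ k => simp [h1, h2, pvPopN_concat]

-- A's stack result equals the kept-segment list of B's recursion
theorem pvKey (segs : List String) :
    segs.foldl
      (fun output segment =>
        if segment = "." then output
        else if segment ≠ ".." then output ++ [segment]
        else if output ≠ [] then output.dropLast
        else output) []
    = (pvResolve segs).2 := by
  rw [pvGen segs []]
  simp [pvPopN_nil]

-- ===== VERDICT (by name: the statement is the Claim_ definition above) =====
theorem remove_dot_segments_spec : Claim_equal_remove_dot_segments := by
  unfold Claim_equal_remove_dot_segments
  intro s _
  unfold Spec_remove_dot_segments remove_dot_segments remove_dot_segments_alt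
  simp only [pvKey]
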